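-- pv_equiv track=rewrite | github.com/henriquebastos/dojorio | 20090304/bank_ocr_2.py | _split_digitos
-- ===== SOURCE A (Python) =====
-- def _split_digitos(digitos):
--     linhas = digitos.split('\n')
--     numero_caracteres = len(linhas[0])
--
--     return [
--         "\n".join(
--             [linhas[0][i : i + 3], linhas[1][i : i + 3], linhas[2][i : i + 3]]
--         )
--         for i in range(0, numero_caracteres, 3)
--     ]
-- ===== SOURCE B (Python) =====
-- def _split_digitos(digitos):
--     linhas = digitos.split('\n')
--     l0, l1, l2 = linhas[0], linhas[1], linhas[2]
--     m = -(-len(l0) // 3)  # number of 3-char groups (ceil)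
--     resultado = []
--     a = b = c = ''
--     for i in range(3 * m):
--         if i > 0 and i % 3 == 0:
--             resultado.append(a + '\n' + b + '\n' + c)
--             a = b = c = ''
--         if i < len(l0):
--             a += l0[i]
--         if i < len(l1):
--             b += l1[i]
--         if i < len(l2):
--             c += l2[i]
--     if m > 0:
--         resultado.append(a + '\n' + b + '\n' + c)
--     return resultado
-- ===== Notes on version B (the rewrite author's own statement) =====
-- stated objective: alternative
-- what changed: B replaces A's slicing comprehension (three 3-char slices per offset, joined) by a streaming character-level pass: one loop over positions with three string accumulators, flushing a finished group at each multiple-of-3 boundary; no slicing is performed at all.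
-- outside the precondition, e.g. on _split_digitos(''): A returns [], B raises IndexError
import Mathlib
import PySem

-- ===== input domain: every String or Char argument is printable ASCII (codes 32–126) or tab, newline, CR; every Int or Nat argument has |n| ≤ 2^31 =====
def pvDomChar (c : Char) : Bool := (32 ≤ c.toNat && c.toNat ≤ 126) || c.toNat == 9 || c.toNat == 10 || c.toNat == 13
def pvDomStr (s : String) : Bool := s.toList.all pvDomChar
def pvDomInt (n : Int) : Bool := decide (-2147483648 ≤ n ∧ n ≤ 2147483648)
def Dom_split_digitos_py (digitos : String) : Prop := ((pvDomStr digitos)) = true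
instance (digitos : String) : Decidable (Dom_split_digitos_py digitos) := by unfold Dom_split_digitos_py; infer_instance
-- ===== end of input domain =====

-- B replaces A's per-offset slicing comprehension by a streaming character-level pass with
-- three accumulators flushed at every multiple-of-3 boundary (no slicing); same cost, alternative algorithm.

-- ===== PORT A =====
def split_digitos_py (digitos : String) : List String :=
  let linhas := (PySem.Str.split? digitos "\n").getD []
  let numero_caracteres : Int := PySem.Str.len ((PySem.List.pyGet? linhas 0).getD "")
  (PySem.List.pyRange 0 numero_caracteres 3).map (fun i =>
    PySem.Str.join "\n"
      [PySem.Str.slice ((PySem.List.pyGet? linhas 0).getD "") (some i) (some (i + 3)),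
       PySem.Str.slice ((PySem.List.pyGet? linhas 1).getD "") (some i) (some (i + 3)),
       PySem.Str.slice ((PySem.List.pyGet? linhas 2).getD "") (some i) (some (i + 3))])

-- ===== PORT B =====
-- the loop body of B's port, named for the proofs (definitionally the port's lambda)
def pvStep (l0 l1 l2 : String)
    (st : List String × List Char × List Char × List Char) (i : Int) :
    List String × List Char × List Char × List Char :=
  let st := if 0 < i ∧ PySem.Int.mod i 3 = 0 then
      (st.1 ++ [String.ofList (st.2.1 ++ '\n' :: st.2.2.1 ++ '\n' :: st.2.2.2)],
       ([] : List Char), ([] : List Char), ([] : List Char))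
    else st
  let a := if i < PySem.Str.len l0 then st.2.1 ++ (PySem.Str.pyGet? l0 i).toList else st.2.1
  let b := if i < PySem.Str.len l1 then st.2.2.1 ++ (PySem.Str.pyGet? l1 i).toList else st.2.2.1
  let c := if i < PySem.Str.len l2 then st.2.2.2 ++ (PySem.Str.pyGet? l2 i).toList else st.2.2.2
  (st.1, a, b, c)

-- accumulators a, b, c are carried as List Char (Python str built by one-char appends);
-- `a += l0[i]` under the range guard is `a ++ (PySem.Str.pyGet? l0 i).toList`.
def split_digitos_py_alt (digitos : String) : List String :=
  let linhas := (PySem.Str.split? digitos "\n").getD []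
  let l0 := (PySem.List.pyGet? linhas 0).getD ""
  let l1 := (PySem.List.pyGet? linhas 1).getD ""
  let l2 := (PySem.List.pyGet? linhas 2).getD ""
  let m : Int := -(PySem.Int.floordiv (-(PySem.Str.len l0)) 3)
  let st :=
    (PySem.List.pyRange 0 (3 * m) 1).foldl
      (pvStep l0 l1 l2)
      ([], [], [], [])
  if 0 < m then st.1 ++ [String.ofList (st.2.1 ++ '\n' :: st.2.2.1 ++ '\n' :: st.2.2.2)] else st.1

-- ===== PRECONDITION & SPEC =====
-- Pre_ excludes blocks with fewer than 3 lines: there Python A raises IndexError unless the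
-- first line is empty (then A returns []), and B's tuple binding raises IndexError.
def Pre_split_digitos_py (digitos : String) : Prop :=
  3 ≤ ((PySem.Str.split? digitos "\n").getD []).length
instance (digitos : String) : Decidable (Pre_split_digitos_py digitos) := by unfold Pre_split_digitos_py; infer_instance
def pvWitness_split_digitos_py : String := "abcd\nefgh\nijkl"
def Spec_split_digitos_py (digitos : String) (out : List String) : Prop := out = split_digitos_py_alt digitos
instance (digitos : String) (out : List String) : Decidable (Spec_split_digitos_py digitos out) := by unfold Spec_split_digitos_py; infer_instance

-- ===== CLAIM (what is proved, stated in full; the proofs are below) =====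
def Claim_equal_split_digitos_py : Prop := ∀ (digitos : String), Dom_split_digitos_py digitos → Pre_split_digitos_py digitos → Spec_split_digitos_py digitos (split_digitos_py digitos)

-- ===== LEMMAS AND PROOFS =====

-- a 3-char chunk of a line, as A's slice produces it
def pvChunk (L : List Char) (p : Nat) : List Char := (L.drop p).take 3

-- the j-th output group
def pvOut (l0 l1 l2 : String) (j : Nat) : String :=
  String.ofList (pvChunk l0.toList (3 * j) ++ '\n' :: pvChunk l1.toList (3 * j) ++ '\n' :: pvChunk l2.toList (3 * j))

lemma pvChunk_eq (L : List Char) (p : Nat) :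
    pvChunk L p = (L[p]?).toList ++ (L[p + 1]?).toList ++ (L[p + 2]?).toList := by
  simp [pvChunk, List.take_add_one, List.getElem?_drop]

lemma pvRange_triple (a : Int) : PySem.List.pyRange a (a + 3) 1 = [a, a + 1, a + 2] := by
  have h : a + 2 = a + 1 + 1 := by ring
  rw [PySem.List.pyRange_one_cons (by omega), PySem.List.pyRange_one_cons (by omega),
      PySem.List.pyRange_one_cons (by omega), PySem.List.pyRange_one_eq_nil (by omega), h]

lemma pvGuard (l : String) (a : List Char) (k : Nat) :
    (if (k : Int) < PySem.Str.len l then a ++ (PySem.Str.pyGet? l (k : Int)).toList else a) =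
      a ++ (l.toList[k]?).toList := by
  rw [PySem.Str.len_eq]
  by_cases h : k < l.toList.length
  · rw [if_pos (by exact_mod_cast h)]
    simp
  · rw [if_neg (by exact_mod_cast h)]
    rw [List.getElem?_eq_none (by omega)]
    simp

lemma pvGuard0 (l : String) (k : Nat) :
    (if (k : Int) < PySem.Str.len l then (PySem.Str.pyGet? l (k : Int)).toList else ([] : List Char)) =
      (l.toList[k]?).toList := by
  have h := pvGuard l [] k
  rwa [List.nil_append] at h

lemma pvModCast (k : Nat) : PySem.Int.mod (k : Int) 3 = 0 ↔ k % 3 = 0 := by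
  rw [PySem.Int.mod_eq_emod_of_pos (by norm_num)]
  omega

lemma pvStep_nat (l0 l1 l2 : String) (res : List String) (a b c : List Char) (k : Nat)
    (hk : ¬ (0 < k ∧ k % 3 = 0)) :
    pvStep l0 l1 l2 (res, a, b, c) (k : Int) =
      (res, a ++ (l0.toList[k]?).toList, b ++ (l1.toList[k]?).toList, c ++ (l2.toList[k]?).toList) := by
  have hg : ¬ (0 < (k : Int) ∧ PySem.Int.mod (k : Int) 3 = 0) := by
    intro h
    exact hk ⟨by exact_mod_cast h.1, (pvModCast k).mp h.2⟩
  simp only [pvStep, if_neg hg, pvGuard]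

lemma pvStep_flush (l0 l1 l2 : String) (res : List String) (a b c : List Char) (k : Nat)
    (h0 : 0 < k) (h3 : k % 3 = 0) :
    pvStep l0 l1 l2 (res, a, b, c) (k : Int) =
      (res ++ [String.ofList (a ++ '\n' :: b ++ '\n' :: c)],
       (l0.toList[k]?).toList, (l1.toList[k]?).toList, (l2.toList[k]?).toList) := by
  have hg : (0 < (k : Int) ∧ PySem.Int.mod (k : Int) 3 = 0) :=
    ⟨by exact_mod_cast h0, (pvModCast k).mpr h3⟩
  simp only [pvStep, if_pos hg, List.nil_append, pvGuard0]

lemma pvInv (l0 l1 l2 : String) (j : Nat) (hj : 1 ≤ j) :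
    (PySem.List.pyRange 0 (3 * (j : Int)) 1).foldl (pvStep l0 l1 l2) ([], [], [], []) =
      ((List.range (j - 1)).map (pvOut l0 l1 l2),
       pvChunk l0.toList (3 * (j - 1)), pvChunk l1.toList (3 * (j - 1)), pvChunk l2.toList (3 * (j - 1))) := by
  induction j with
  | zero => omega
  | succ j ih =>
    by_cases hj1 : j = 0
    · subst hj1
      have h3 : (3 : Int) * ((1 : Nat) : Int) = 0 + 3 := by norm_num
      rw [h3, pvRange_triple]
      simp only [List.foldl]
      rw [show ((0:Int) = ((0:Nat):Int)) from rfl]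
      rw [pvStep_nat l0 l1 l2 _ _ _ _ 0 (by omega)]
      rw [show ((((0:Nat):Int)) + 1 = ((1:Nat):Int)) from by norm_num]
      rw [pvStep_nat l0 l1 l2 _ _ _ _ 1 (by omega)]
      rw [show ((((0:Nat):Int)) + 2 = ((2:Nat):Int)) from by norm_num]
      rw [pvStep_nat l0 l1 l2 _ _ _ _ 2 (by omega)]
      simp [pvChunk_eq]
    · have hj' : 1 ≤ j := by omega
      have hsplit : PySem.List.pyRange 0 (3 * ((j + 1 : Nat) : Int)) 1 =
          PySem.List.pyRange 0 (3 * (j : Int)) 1 ++ PySem.List.pyRange (3 * (j : Int)) (3 * (j : Int) + 3) 1 := by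
        rw [show (3 * ((j + 1 : Nat) : Int)) = 3 * (j : Int) + 3 from by push_cast; ring]
        exact PySem.List.pyRange_one_append 0 (3 * (j : Int)) _ (by positivity) (by omega)
      rw [hsplit, List.foldl_append, ih hj', pvRange_triple]
      simp only [List.foldl]
      rw [show ((3 * (j : Int)) = ((3 * j : Nat) : Int)) from by push_cast; ring]
      rw [pvStep_flush l0 l1 l2 _ _ _ _ (3 * j) (by omega) (by omega)]
      rw [show (((3 * j : Nat) : Int) + 1 = ((3 * j + 1 : Nat) : Int)) from by push_cast; ring]
      rw [pvStep_nat l0 l1 l2 _ _ _ _ (3 * j + 1) (by omega)]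
      rw [show (((3 * j : Nat) : Int) + 2 = ((3 * j + 2 : Nat) : Int)) from by push_cast; ring]
      rw [pvStep_nat l0 l1 l2 _ _ _ _ (3 * j + 2) (by omega)]
      have hrange : List.range (j + 1 - 1) = List.range (j - 1) ++ [j - 1] := by
        rw [show j + 1 - 1 = (j - 1) + 1 from by omega]
        exact List.range_succ
      rw [hrange]
      simp [pvChunk_eq, pvOut]

lemma pvA_elem (l0 l1 l2 : String) (k : Nat) :
    PySem.Str.join "\n"
      [PySem.Str.slice l0 (some ((3 * k : Nat) : Int)) (some (((3 * k : Nat) : Int) + 3)),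
       PySem.Str.slice l1 (some ((3 * k : Nat) : Int)) (some (((3 * k : Nat) : Int) + 3)),
       PySem.Str.slice l2 (some ((3 * k : Nat) : Int)) (some (((3 * k : Nat) : Int) + 3))] =
    pvOut l0 l1 l2 k := by
  have hsl : ∀ L : List Char, PySem.List.slice L (some (3 * (k : Int))) (some (3 * (k : Int) + 3)) = pvChunk L (3 * k) := by
    intro L
    rw [PySem.List.slice_toNat L (by positivity) (by positivity)]
    rw [show ((3 * (k : Int))).toNat = 3 * k from by omega,
        show ((3 * (k : Int) + 3)).toNat = 3 * k + 3 from by omega,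
        show 3 * k + 3 - 3 * k = 3 from by omega]
    rfl
  unfold pvOut
  rw [show pvChunk l0.toList (3 * k) ++ '\n' :: pvChunk l1.toList (3 * k) ++ '\n' :: pvChunk l2.toList (3 * k) =
        (PySem.Str.join "\n"
          [PySem.Str.slice l0 (some ((3 * k : Nat) : Int)) (some (((3 * k : Nat) : Int) + 3)),
           PySem.Str.slice l1 (some ((3 * k : Nat) : Int)) (some (((3 * k : Nat) : Int) + 3)),
           PySem.Str.slice l2 (some ((3 * k : Nat) : Int)) (some (((3 * k : Nat) : Int) + 3))]).toList from ?_,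
      String.ofList_toList]
  rw [PySem.Str.toList_join]
  simp [PySem.Chars.join, hsl, List.intercalate]

lemma pvKey (l0 l1 l2 : String) :
    (PySem.List.pyRange 0 (PySem.Str.len l0) 3).map (fun i =>
      PySem.Str.join "\n"
        [PySem.Str.slice l0 (some i) (some (i + 3)),
         PySem.Str.slice l1 (some i) (some (i + 3)),
         PySem.Str.slice l2 (some i) (some (i + 3))]) =
    (let m : Int := -(PySem.Int.floordiv (-(PySem.Str.len l0)) 3)
     let st := (PySem.List.pyRange 0 (3 * m) 1).foldl (pvStep l0 l1 l2) ([], [], [], [])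
     if 0 < m then st.1 ++ [String.ofList (st.2.1 ++ '\n' :: st.2.2.1 ++ '\n' :: st.2.2.2)] else st.1) := by
  simp only []
  set N := l0.toList.length with hN
  set M := (N + 2) / 3 with hM
  have hlen : PySem.Str.len l0 = (N : Int) := PySem.Str.len_eq l0
  have hm : -(PySem.Int.floordiv (-(PySem.Str.len l0)) 3) = (M : Int) := by
    rw [hlen]
    exact (PySem.Int.neg_floordiv_neg_eq_iff_of_pos (by norm_num)).mpr (by omega)
  have hrangeA : PySem.List.pyRange 0 (PySem.Str.len l0) 3 =
      (List.range M).map (fun k => ((3 * k : Nat) : Int)) := by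
    rw [hlen, PySem.List.pyRange_of_pos 0 (N : Int) (by norm_num)]
    have hif : (if (0 : Int) < (N : Int) then (((N : Int) - 0 + 3 - 1) / 3).toNat else 0) = M := by
      by_cases h : 0 < N
      · rw [if_pos (by exact_mod_cast h)]; omega
      · rw [if_neg (by exact_mod_cast h)]; omega
    rw [hif]
    exact List.map_congr_left (fun k _ => by push_cast; ring)
  have hA : (PySem.List.pyRange 0 (PySem.Str.len l0) 3).map (fun i =>
      PySem.Str.join "\n"
        [PySem.Str.slice l0 (some i) (some (i + 3)),
         PySem.Str.slice l1 (some i) (some (i + 3)),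
         PySem.Str.slice l2 (some i) (some (i + 3))]) = (List.range M).map (pvOut l0 l1 l2) := by
    rw [hrangeA, List.map_map]
    exact List.map_congr_left (fun k _ => pvA_elem l0 l1 l2 k)
  rw [hA, hm]
  by_cases hM0 : M = 0
  · rw [if_neg (by simp [hM0])]
    simp [hM0, PySem.List.pyRange_one_eq_nil (by norm_num : (0:Int) ≤ 0)]
  · rw [if_pos (by exact_mod_cast Nat.pos_of_ne_zero hM0)]
    rw [pvInv l0 l1 l2 M (by omega)]
    rw [show M = (M - 1) + 1 from by omega, List.range_succ]
    simp [pvOut]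

-- ===== VERDICT (by name: the statement is the Claim_ definition above) =====
theorem split_digitos_py_spec : Claim_equal_split_digitos_py := by
  intro digitos _ _
  unfold Spec_split_digitos_py
  simp only [split_digitos_py, split_digitos_py_alt]
  exact pvKey _ _ _
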